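-- pv_equiv track=rewrite | github.com/tuliman/Cata | cata20.py | f
-- ===== SOURCE A (Python) =====
-- def is_prime(n):
--     d = 2
--     while d * d <= n and n % d != 0:
--         d += 1
--     return d * d > n
--
-- def even_numbers(num):
--     score = 0
--     for i in (str(num)):
--         if int(i)%2==0:
--             score+=1
--     return score
--
-- def f(n):
--     prew = 0
--     max_even_num = 0
--
--     for i in range(n - 1, 0, -1):
--         if is_prime(i):
--             even_numbers(i)
--             if even_numbers(i)>prew:
--
--                 prew=even_numbers(i)
--                 max_even_num = i
--     return max_even_num
-- ===== SOURCE B (Python) =====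
-- def f(n):
--     m = n - 1
--     if m < 2:
--         return 0
--     # Sieve of Eratosthenes up to m
--     sieve = [True] * (m + 1)
--     sieve[0] = False
--     sieve[1] = False
--     p = 2
--     while p * p <= m:
--         if sieve[p]:
--             for q in range(p * p, m + 1, p):
--                 sieve[q] = False
--         p += 1
--     best = 0
--     best_cnt = 0
--     for p in range(2, m + 1):
--         if sieve[p]:
--             c = sum(int(ch) % 2 == 0 for ch in str(p))
--             if c > 0 and c >= best_cnt:
--                 best = p
--                 best_cnt = c
--     return best
-- ===== Notes on version B (the rewrite author's own statement) =====
-- stated objective: faster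
-- what changed: Replaces A's per-number trial-division primality test inside a descending scan by a Sieve of Eratosthenes built once, followed by one ascending pass over the sieve that keeps the last prime attaining the maximal even-digit count (the >=-update reproduces A's largest-prime-on-ties choice).
import Mathlib
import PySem

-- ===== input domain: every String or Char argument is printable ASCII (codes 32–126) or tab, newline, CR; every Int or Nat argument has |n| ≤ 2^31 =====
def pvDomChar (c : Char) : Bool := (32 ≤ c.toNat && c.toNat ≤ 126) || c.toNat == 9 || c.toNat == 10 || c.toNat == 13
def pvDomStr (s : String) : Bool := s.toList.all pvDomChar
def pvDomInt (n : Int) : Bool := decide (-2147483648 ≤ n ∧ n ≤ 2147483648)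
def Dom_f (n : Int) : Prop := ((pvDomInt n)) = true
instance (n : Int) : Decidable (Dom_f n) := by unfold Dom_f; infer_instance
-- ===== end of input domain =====

-- B replaces A's per-number trial-division primality test inside a descending scan by a
-- Sieve of Eratosthenes built once, then one ascending pass keeping the last prime that
-- attains the maximal even-digit count (objective: faster; equal return value proved below).

-- ===== PORT A =====

-- 'int(ch) % 2 == 0' for one character; int(ch) raises on a non-digit, but every character of
-- str(num) for the positive num reached here is a digit, so the getD default is never used.
def evPred (ch : Char) : Bool :=
  PySem.Int.mod ((PySem.Int.ofStr? (String.singleton ch)).getD 0) 2 == 0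

-- the 'while d * d <= n and n % d != 0: d += 1' loop of is_prime; d starts at 2 and only
-- increases, so a Nat counter coincides with Python's int d on every reachable state
def isPrimeLoop (n : Int) (d : Nat) : Bool :=
  if h : (d : Int) * d ≤ n ∧ PySem.Int.mod n d ≠ 0 then
    isPrimeLoop n (d + 1)
  else
    decide ((d : Int) * d > n)
termination_by n.toNat + 1 - d
decreasing_by
  rcases Nat.eq_zero_or_pos d with h0 | h0
  · omega
  · have h1 : (1 : Int) ≤ (d : Int) := by exact_mod_cast h0
    have h2 : (d : Int) ≤ (d : Int) * d := le_mul_of_one_le_left (by positivity) h1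
    have h3 : (d : Int) ≤ n := le_trans h2 h.1
    omega

def is_prime (n : Int) : Bool := isPrimeLoop n 2

def even_numbers (num : Int) : Int :=
  (PySem.Int.toStr num).toList.foldl
    (fun score ch => if evPred ch then score + 1 else score) 0

def f (n : Int) : Int :=
  ((PySem.List.pyRange (n - 1) 0 (-1)).foldl
    (fun (s : Int × Int) i =>
      if is_prime i then
        let _ := even_numbers i
        if even_numbers i > s.1 then (even_numbers i, i) else s
      else s) (0, 0)).2

-- ===== PORT B =====

-- the 'while p * p <= m: if sieve[p]: for q in range(p*p, m+1, p): sieve[q] = False; p += 1'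
-- sieve-building loop of B; p starts at 2 and only increases, so a Nat counter coincides with
-- Python's int p; sieve[p] and sieve[q] are always in range (p*p ≤ m, q ≤ m < len(sieve)), so
-- the getD default and the toNat of the nonnegative q are exact
def sieveLoop (m : Int) (s : List Bool) (p : Nat) : List Bool :=
  if h : (p : Int) * p ≤ m then
    sieveLoop m
      (if s.getD p false then
        (PySem.List.pyRange ((p : Int) * p) (m + 1) (p : Int)).foldl
          (fun t q => t.set q.toNat false) s
       else s) (p + 1)
  else s
termination_by m.toNat + 1 - p
decreasing_by
  rcases Nat.eq_zero_or_pos p with h0 | h0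
  · omega
  · have h1 : (1 : Int) ≤ (p : Int) := by exact_mod_cast h0
    have h2 : (p : Int) ≤ (p : Int) * p := le_mul_of_one_le_left (by positivity) h1
    have h3 : (p : Int) ≤ m := le_trans h2 h
    omega

-- 'sum(int(ch) % 2 == 0 for ch in str(p))' (a sum of booleans)
def evCount (p : Int) : Int :=
  ((PySem.Int.toStr p).toList.map (fun ch => if evPred ch then (1 : Int) else 0)).sum

def f_alt (n : Int) : Int :=
  let m := n - 1
  if m < 2 then 0
  else
    let sieve := sieveLoop m (((List.replicate (m.toNat + 1) true).set 0 false).set 1 false) 2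
    ((PySem.List.pyRange 2 (m + 1) 1).foldl
      (fun (s : Int × Int) p =>
        if sieve.getD p.toNat false then
          let c := evCount p
          if 0 < c ∧ s.2 ≤ c then (p, c) else s
        else s) (0, 0)).1

-- ===== PRECONDITION & SPEC =====
def Spec_f (n : Int) (out : Int) : Prop := out = f_alt n
instance (n : Int) (out : Int) : Decidable (Spec_f n out) := by unfold Spec_f; infer_instance

-- ===== CLAIM (what is proved, stated in full; the proofs are below) =====
def Claim_equal_f : Prop := ∀ (n : Int), Dom_f n → Spec_f n (f n)

-- ===== LEMMAS AND PROOFS =====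

def condA (i : Int) : Bool := is_prime i && (even_numbers i != 0)

def keyA (i : Int) : Int × Int := (even_numbers i, i)

def stepA (s : Int × Int) (i : Int) : Int × Int :=
  if is_prime i then
    let _ := even_numbers i
    if even_numbers i > s.1 then (even_numbers i, i) else s
  else s

def pmax (a b : Int × Int) : Int × Int :=
  if a.1 < b.1 ∨ (a.1 = b.1 ∧ a.2 < b.2) then b else a

def gB (s : Int × Int) (p : Int) : Int × Int :=
  if s.2 ≤ even_numbers p then (p, even_numbers p) else s

def NoFac (P q : Nat) : Prop := ∀ d : Nat, 2 ≤ d → d < P → d * d ≤ q → ¬ d ∣ q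

theorem even_numbers_eq_countP (num : Int) :
    even_numbers num = ((PySem.Int.toStr num).toList.countP evPred : Int) := by
  simpa [even_numbers] using
    PySem.List.foldl_if_add_one evPred (PySem.Int.toStr num).toList 0

theorem even_numbers_nonneg (num : Int) : 0 ≤ even_numbers num := by
  rw [even_numbers_eq_countP]; positivity

theorem evCount_eq (p : Int) : evCount p = even_numbers p := by
  rw [even_numbers_eq_countP, evCount, PySem.List.sum_map_ite_one_zero]

theorem isPrimeLoop_iff (n : Int) (d : Nat) :
    isPrimeLoop n d = true ↔
      ∀ e : Nat, d ≤ e → (e : Int) * e ≤ n → PySem.Int.mod n e ≠ 0 := by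
  fun_induction isPrimeLoop n d with
  | case1 d h ih =>
    constructor
    · intro hl e hde he
      rcases Nat.eq_or_lt_of_le hde with rfl | hlt
      · exact h.2
      · exact (ih.mp hl) e hlt he
    · intro hall
      exact ih.mpr (fun e he1 he2 => hall e (by omega) he2)
  | case2 d h =>
    rcases not_and_or.mp h with hgt | hmod
    · push_neg at hgt
      simp only [decide_eq_true_eq]
      constructor
      · intro _ e hde he
        exfalso
        have : (d : Int) * d ≤ (e : Int) * e := by
          have : (d : Int) ≤ e := by exact_mod_cast hde
          nlinarith [Int.natCast_nonneg d, Int.natCast_nonneg e]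
        omega
      · intro _; omega
    · push_neg at hmod
      simp only [decide_eq_true_eq]
      constructor
      · intro hgt
        intro e hde he
        exfalso
        have hdd : (d : Int) * d ≤ n := by
          by_contra hc
          push_neg at hc
          have : (d : Int) * d ≤ (e : Int) * e := by
            have : (d : Int) ≤ e := by exact_mod_cast hde
            nlinarith [Int.natCast_nonneg d, Int.natCast_nonneg e]
          omega
        omega
      · intro hall
        by_cases hdd : (d : Int) * d ≤ n
        · exact ((hall d le_rfl hdd) hmod).elim
        · omega

theorem is_prime_iff (n : Int) :
    is_prime n = true ↔
      ∀ e : Nat, 2 ≤ e → (e : Int) * e ≤ n → PySem.Int.mod n e ≠ 0 :=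
  isPrimeLoop_iff n 2

-- setting a cell to false, read back with default false (out-of-range set is a no-op and
-- an out-of-range read returns the default false, so the side condition disappears)
theorem set_false_getD (s : List Bool) (j i : Nat) :
    (s.set j false).getD i false = if j = i then false else s.getD i false := by
  simp only [List.getD_eq_getElem?_getD, List.getElem?_set]
  split_ifs with h1 h2 <;> simp

theorem foldl_set_getD (l : List Int) (s : List Bool) (i : Nat) :
    (l.foldl (fun t q => t.set q.toNat false) s).getD i false
      = if l.any (fun q => q.toNat == i) then false else s.getD i false := by
  induction l generalizing s with
  | nil => simp
  | cons q t ih =>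
    simp only [List.foldl_cons, List.any_cons, ih, set_false_getD]
    by_cases h : q.toNat = i <;> simp [h]

theorem mark_any_iff (p : Nat) (hp : 2 ≤ p) (m : Int) (q : Nat) (hq : (q : Int) ≤ m) :
    ((PySem.List.pyRange ((p : Int) * p) (m + 1) (p : Int)).any
        (fun x => x.toNat == q)) = true ↔ p * p ≤ q ∧ p ∣ q := by
  have hp0 : (0 : Int) < (p : Int) := by exact_mod_cast (by omega : 0 < p)
  have hpp : (p : Int) ∣ (p : Int) * p := Dvd.intro _ rfl
  simp only [List.any_eq_true, beq_iff_eq]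
  constructor
  · rintro ⟨x, hx, rfl⟩
    rw [PySem.List.mem_pyRange_iff_of_pos hp0] at hx
    obtain ⟨h1, _, h3⟩ := hx
    have hx0 : (0 : Int) ≤ x := le_trans (by positivity) h1
    have hdx : (p : Int) ∣ x := by
      have := dvd_add h3 hpp
      simpa using this
    constructor
    · have : ((p * p : Nat) : Int) ≤ ((x.toNat : Nat) : Int) := by push_cast; omega
      exact_mod_cast this
    · have : (p : Int) ∣ ((x.toNat : Nat) : Int) := by rwa [Int.toNat_of_nonneg hx0]
      exact_mod_cast this
  · rintro ⟨h1, h2⟩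
    refine ⟨(q : Int), ?_, by simp⟩
    rw [PySem.List.mem_pyRange_iff_of_pos hp0]
    refine ⟨by exact_mod_cast h1, by omega, ?_⟩
    have : (p : Int) ∣ (q : Int) := by exact_mod_cast h2
    exact dvd_sub this hpp

theorem sieveLoop_spec (m : Int) (s : List Bool) (p : Nat) :
    2 ≤ p →
    (∀ q : Nat, (q : Int) ≤ m → ((s.getD q false) = true ↔ 2 ≤ q ∧ NoFac p q)) →
    ∀ q : Nat, (q : Int) ≤ m →
      ((sieveLoop m s p).getD q false = true ↔ 2 ≤ q ∧ NoFac (m.toNat + 2) q) := by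
  fun_induction sieveLoop m s p with
  | case1 s p h ih =>
    intro hp hs
    refine ih (by omega) ?_
    have hpm : ((p : Int)) ≤ m := by
      have h1 : (1 : Int) ≤ (p : Int) := by exact_mod_cast (by omega : 1 ≤ p)
      exact le_trans (le_mul_of_one_le_left (by positivity) h1) h
    intro q hq
    by_cases hsp : s.getD p false = true
    · -- sieve[p] is still true: mark all multiples q of p with p*p ≤ q ≤ m
      rw [dif_pos hsp, foldl_set_getD]
      by_cases hmark : ((PySem.List.pyRange ((p : Int) * p) (m + 1) (p : Int)).any
          (fun x => x.toNat == q)) = true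
      · have hppq := (mark_any_iff p hp m q hq).mp hmark
        simp only [hmark, if_true, Bool.false_eq_true, false_iff]
        rintro ⟨-, hnf⟩
        exact hnf p hp (by omega) hppq.1 hppq.2
      · have hnm : ¬ (p * p ≤ q ∧ p ∣ q) :=
          fun hc => hmark ((mark_any_iff p hp m q hq).mpr hc)
        simp only [Bool.not_eq_true] at hmark
        simp only [hmark, Bool.false_eq_true, if_false]
        rw [hs q hq]
        constructor
        · rintro ⟨h2q, hnf⟩
          refine ⟨h2q, fun d hd2 hdp hdd hdvd => ?_⟩
          rcases Nat.lt_or_ge d p with hlt | hge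
          · exact hnf d hd2 hlt hdd hdvd
          · have : d = p := by omega
            subst this
            exact hnm ⟨hdd, hdvd⟩
        · rintro ⟨h2q, hnf⟩
          exact ⟨h2q, fun d hd2 hdp hdd hdvd => hnf d hd2 (by omega) hdd hdvd⟩
    · -- sieve[p] already false: p has a smaller factor, so its multiples are already marked
      rw [dif_neg hsp, hs q hq]
      have hwit : ∃ d, 2 ≤ d ∧ d < p ∧ d * d ≤ p ∧ d ∣ p := by
        by_contra hno
        push_neg at hno
        exact hsp ((hs p hpm).mpr ⟨hp, fun d h1 h2 h3 => hno d h1 h2 h3⟩)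
      obtain ⟨d0, hd02, hd0p, hd0d, hd0dvd⟩ := hwit
      constructor
      · rintro ⟨h2q, hnf⟩
        refine ⟨h2q, fun d hd2 hdp hdd hdvd => ?_⟩
        rcases Nat.lt_or_ge d p with hlt | hge
        · exact hnf d hd2 hlt hdd hdvd
        · have hdq : d = p := by omega
          subst hdq
          -- d0 is a smaller factor of q via d ∣ q
          exact hnf d0 hd02 hd0p
            (le_trans hd0d (le_trans (Nat.le_mul_of_pos_left _ (by omega)) hdd))
            (dvd_trans hd0dvd hdvd)
      · rintro ⟨h2q, hnf⟩
        exact ⟨h2q, fun d hd2 hdp hdd hdvd => hnf d hd2 (by omega) hdd hdvd⟩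
  | case2 s p h =>
    intro hp hs q hq
    rw [hs q hq]
    constructor
    · rintro ⟨h2q, hnf⟩
      refine ⟨h2q, fun d hd2 hdP hdd hdvd => ?_⟩
      have hdp : d < p := by
        by_contra hc
        push_neg at hc
        have h1 : (p : Int) * p ≤ (d : Int) * d := by
          have : (p : Int) ≤ d := by exact_mod_cast hc
          nlinarith [Int.natCast_nonneg p, Int.natCast_nonneg d]
        have h2 : ((d * d : Nat) : Int) ≤ (q : Int) := by exact_mod_cast hdd
        push_cast at h2
        omega
      exact hnf d hd2 hdp hdd hdvd
    · rintro ⟨h2q, hnf⟩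
      refine ⟨h2q, fun d hd2 hdp hdd hdvd => ?_⟩
      have hdm : d < m.toNat + 2 := by
        have h2 : ((d * d : Nat) : Int) ≤ (q : Int) := by exact_mod_cast hdd
        have : d ≤ d * d := Nat.le_mul_of_pos_left _ (by omega)
        omega
      exact hnf d hd2 hdm hdd hdvd

theorem init_getD (m : Int) (q : Nat) (hq : (q : Int) ≤ m) :
    ((((List.replicate (m.toNat + 1) true).set 0 false).set 1 false).getD q false) = true
      ↔ 2 ≤ q := by
  rw [set_false_getD, set_false_getD]
  have hqm : q < m.toNat + 1 := by omega
  split_ifs with h1 h0 <;>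
    simp_all [List.getD_eq_getElem?_getD, List.getElem?_replicate, hqm] <;> omega

-- the finished sieve read at a prime candidate i agrees with A's trial-division test
theorem sieve_eq_is_prime (m : Int) (i : Int) (h2 : 2 ≤ i) (him : i ≤ m) :
    (sieveLoop m (((List.replicate (m.toNat + 1) true).set 0 false).set 1 false) 2).getD
        i.toNat false = is_prime i := by
  have hq : ((i.toNat : Nat) : Int) ≤ m := by omega
  have hmain := sieveLoop_spec m _ 2 le_rfl
    (fun q hq' => by
      rw [init_getD m q hq']
      exact ⟨fun h => ⟨h, fun d hd2 hd hdd => by omega⟩, fun h => h.1⟩)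
    i.toNat hq
  rw [Bool.eq_iff_iff, hmain, is_prime_iff]
  constructor
  · rintro ⟨-, hnf⟩ e he2 hee
    rw [ne_eq, PySem.Int.mod_eq_zero_iff_dvd]
    intro hdvd
    have hee' : e * e ≤ i.toNat := by
      have : ((e * e : Nat) : Int) ≤ i := by push_cast; omega
      omega
    have hdvd' : e ∣ i.toNat := by
      have : (e : Int) ∣ ((i.toNat : Nat) : Int) := by
        rwa [Int.toNat_of_nonneg (by omega)]
      exact_mod_cast this
    have heb : e < m.toNat + 2 := by
      have : e ≤ e * e := Nat.le_mul_of_pos_left _ (by omega)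
      omega
    exact hnf e he2 heb hee' hdvd'
  · intro hall
    refine ⟨by omega, fun d hd2 hdb hdd hdvd => ?_⟩
    have h1 : (d : Int) * d ≤ i := by
      have : ((d * d : Nat) : Int) ≤ ((i.toNat : Nat) : Int) := by exact_mod_cast hdd
      push_cast at this; omega
    have h2' : (d : Int) ∣ i := by
      have : (d : Int) ∣ ((i.toNat : Nat) : Int) := by exact_mod_cast hdvd
      rwa [Int.toNat_of_nonneg (by omega)] at this
    exact hall d hd2 h1 ((PySem.Int.mod_eq_zero_iff_dvd _ _).mpr h2')

theorem pmax_right_comm (b a₁ a₂ : Int × Int) :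
    pmax (pmax b a₁) a₂ = pmax (pmax b a₂) a₁ := by
  rcases b with ⟨b1, b2⟩; rcases a₁ with ⟨x1, x2⟩; rcases a₂ with ⟨y1, y2⟩
  simp only [pmax]
  split_ifs <;> first | rfl | (simp only [Prod.mk.injEq]; omega)

theorem foldl_pmax_reverse (l : List (Int × Int)) (init : Int × Int) :
    l.reverse.foldl pmax init = l.foldl pmax init := by
  haveI : RightCommutative pmax := ⟨pmax_right_comm⟩
  exact (List.reverse_perm l).foldl_eq init

theorem foldA (l : List Int) (s : Int × Int)
    (hsort : l.Pairwise (· > ·))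
    (hs : s = (0, 0) ∨ (1 ≤ s.1 ∧ ∀ x ∈ l, x < s.2)) :
    l.foldl stepA s = ((l.filter condA).map keyA).foldl pmax s := by
  induction l generalizing s with
  | nil => rfl
  | cons i t ih =>
    have hti : ∀ x ∈ t, x < i := fun x hx => (List.pairwise_cons.mp hsort).1 x hx
    have htp : t.Pairwise (· > ·) := (List.pairwise_cons.mp hsort).2
    have hs1 : 0 ≤ s.1 := by
      rcases hs with rfl | ⟨h1, _⟩
      · norm_num
      · omega
    by_cases hip : is_prime i = true
    · by_cases hc : even_numbers i > s.1
      · have hne : condA i = true := by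
          simp only [condA, hip, Bool.true_and, bne_iff_ne, ne_eq]
          omega
        have hstep : stepA s i = (even_numbers i, i) := by
          simp only [stepA, hip, if_true, if_pos hc]
        have hpm : pmax s (keyA i) = (even_numbers i, i) := by
          simp only [pmax, keyA, if_pos (Or.inl hc)]
        simp only [List.foldl_cons, List.filter_cons, hne, if_true, List.map_cons,
          List.foldl_cons, hstep, hpm]
        exact ih _ htp (Or.inr ⟨by omega, fun x hx => hti x hx⟩)
      · push_neg at hc
        have hstep : stepA s i = s := by
          simp only [stepA, hip, if_true, if_neg (by omega : ¬ even_numbers i > s.1)]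
        by_cases hz : even_numbers i = 0
        · have hne : condA i = false := by
            simp [condA, hip, hz]
          simp only [List.foldl_cons, List.filter_cons, hne, Bool.false_eq_true,
            if_false, hstep]
          refine ih _ htp ?_
          rcases hs with rfl | ⟨h1, h2⟩
          · exact Or.inl rfl
          · exact Or.inr ⟨h1, fun x hx => h2 x (List.mem_cons_of_mem i hx)⟩
        · have hne : condA i = true := by
            simp [condA, hip, hz]
          have hev1 : 1 ≤ even_numbers i := by
            have := even_numbers_nonneg i; omega
          have hpm : pmax s (keyA i) = s := by
            simp only [pmax, keyA]
            rw [if_neg]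
            push_neg
            refine ⟨by omega, fun he => ?_⟩
            rcases hs with rfl | ⟨h1, h2⟩
            · simp at he; omega
            · have := h2 i (List.mem_cons_self ..)
              omega
          simp only [List.foldl_cons, List.filter_cons, hne, if_true, List.map_cons,
            List.foldl_cons, hstep, hpm]
          refine ih _ htp ?_
          rcases hs with rfl | ⟨h1, h2⟩
          · exact Or.inl rfl
          · exact Or.inr ⟨h1, fun x hx => h2 x (List.mem_cons_of_mem i hx)⟩
    · have hne : condA i = false := by
        simp [condA, hip]
      have hstep : stepA s i = s := by
        simp only [stepA, if_neg hip]
      simp only [List.foldl_cons, List.filter_cons, hne, Bool.false_eq_true, if_false, hstep]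
      refine ih _ htp ?_
      rcases hs with rfl | ⟨h1, h2⟩
      · exact Or.inl rfl
      · exact Or.inr ⟨h1, fun x hx => h2 x (List.mem_cons_of_mem i hx)⟩

-- B's ascending >=-update pass computes the same lexicographic maximum, tracked as (best, cnt)
theorem foldB (l : List Int) (s : Int × Int)
    (hsort : l.Pairwise (· < ·))
    (hcond : ∀ x ∈ l, condA x = true)
    (hs : s = (0, 0) ∨ (1 ≤ s.2 ∧ ∀ x ∈ l, s.1 < x)) :
    l.foldl gB s = Prod.swap ((l.map keyA).foldl pmax (s.2, s.1)) := by
  induction l generalizing s with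
  | nil => rfl
  | cons i t ih =>
    have hti : ∀ x ∈ t, i < x := fun x hx => (List.pairwise_cons.mp hsort).1 x hx
    have htp : t.Pairwise (· < ·) := (List.pairwise_cons.mp hsort).2
    have hci : condA i = true := hcond i (List.mem_cons_self ..)
    have hev1 : 1 ≤ even_numbers i := by
      have := even_numbers_nonneg i
      simp only [condA, Bool.and_eq_true, bne_iff_ne, ne_eq] at hci
      omega
    by_cases hup : s.2 ≤ even_numbers i
    · have hstep : gB s i = (i, even_numbers i) := by
        simp only [gB, if_pos hup]
      have hpm : pmax (s.2, s.1) (keyA i) = (even_numbers i, i) := by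
        simp only [pmax, keyA]
        rw [if_pos]
        rcases lt_or_eq_of_le hup with hlt | heq
        · exact Or.inl hlt
        · refine Or.inr ⟨heq, ?_⟩
          rcases hs with rfl | ⟨h1, h2⟩
          · simp at heq ⊢; omega
          · exact h2 i (List.mem_cons_self ..)
      simp only [List.foldl_cons, List.map_cons, hstep, hpm]
      exact ih _ htp (fun x hx => hcond x (List.mem_cons_of_mem i hx))
        (Or.inr ⟨hev1, fun x hx => hti x hx⟩)
    · push_neg at hup
      have hstep : gB s i = s := by
        simp only [gB, if_neg (by omega : ¬ s.2 ≤ even_numbers i)]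
      have hpm : pmax (s.2, s.1) (keyA i) = (s.2, s.1) := by
        simp only [pmax, keyA]
        rw [if_neg]
        push_neg
        exact ⟨by omega, fun h => by omega⟩
      simp only [List.foldl_cons, List.map_cons, hstep, hpm]
      refine ih _ htp (fun x hx => hcond x (List.mem_cons_of_mem i hx)) ?_
      rcases hs with rfl | ⟨h1, h2⟩
      · exact Or.inl rfl
      · exact Or.inr ⟨h1, fun x hx => h2 x (List.mem_cons_of_mem i hx)⟩

theorem condA_one : condA 1 = false := by
  have h1 : is_prime 1 = true := by
    rw [is_prime, isPrimeLoop]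
    norm_num
  have h2 : even_numbers 1 = 0 := by decide
  simp [condA, h1, h2]

theorem filter_condA_range (n : Int) :
    (PySem.List.pyRange 1 n 1).filter condA = (PySem.List.pyRange 2 n 1).filter condA := by
  by_cases h : 1 < n
  · rw [PySem.List.pyRange_one_cons h, List.filter_cons, condA_one]
    simp
  · push_neg at h
    rw [PySem.List.pyRange_one_eq_nil h, PySem.List.pyRange_one_eq_nil (by omega)]

theorem f_eq_pmax (n : Int) :
    f n = ((((PySem.List.pyRange 2 n 1).filter condA).map keyA).foldl pmax (0, 0)).2 := by
  have h : PySem.List.pyRange (n - 1) 0 (-1) = (PySem.List.pyRange 1 n 1).reverse := by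
    have := PySem.List.pyRange_neg_one_eq_reverse (n - 1) 0
    simpa using this
  have hf : f n = (((PySem.List.pyRange 1 n 1).reverse).foldl stepA (0, 0)).2 := by
    simp only [f, h]; rfl
  rw [hf, foldA _ _ (by
        rw [List.pairwise_reverse]
        simpa using PySem.List.pairwise_lt_pyRange_one 1 n) (Or.inl rfl)]
  rw [List.filter_reverse, List.map_reverse, foldl_pmax_reverse, filter_condA_range]

theorem f_alt_eq_pmax (n : Int) (hn : 2 ≤ n - 1) :
    f_alt n = ((((PySem.List.pyRange 2 n 1).filter condA).map keyA).foldl pmax (0, 0)).2 := by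
  have hrange : n - 1 + 1 = n := by omega
  simp only [f_alt, if_neg (by omega : ¬ n - 1 < 2), hrange]
  have hcongr : (PySem.List.pyRange 2 n 1).foldl
      (fun (s : Int × Int) p =>
        if (sieveLoop (n - 1) (((List.replicate ((n - 1).toNat + 1) true).set 0 false).set 1
              false) 2).getD p.toNat false then
          let c := evCount p
          if 0 < c ∧ s.2 ≤ c then (p, c) else s
        else s) (0, 0)
      = (PySem.List.pyRange 2 n 1).foldl
          (fun (s : Int × Int) p => if condA p then gB s p else s) (0, 0) := by
    refine PySem.List.foldl_congr_mem _ _ _ _ ?_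
    intro acc p hp
    obtain ⟨hp2, hpn⟩ := PySem.List.mem_pyRange_one.mp hp
    rw [sieve_eq_is_prime (n - 1) p hp2 (by omega), evCount_eq]
    have hev := even_numbers_nonneg p
    by_cases h1 : is_prime p = true
    · simp only [h1, if_true]
      show (if 0 < even_numbers p ∧ acc.2 ≤ even_numbers p then (p, even_numbers p) else acc)
          = if condA p = true then gB acc p else acc
      by_cases h2 : even_numbers p = 0
      · have hc : condA p = false := by simp [condA, h1, h2]
        simp only [hc, Bool.false_eq_true, if_false]
        rw [if_neg (by omega)]
      · have hc : condA p = true := by simp [condA, h1, h2]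
        simp only [hc, if_true, gB]
        by_cases h3 : acc.2 ≤ even_numbers p
        · rw [if_pos ⟨by omega, h3⟩, if_pos h3]
        · rw [if_neg (fun hcc => h3 hcc.2), if_neg h3]
    · have hc : condA p = false := by simp [condA, h1]
      simp only [hc, Bool.false_eq_true, if_false]
      rw [if_neg h1]
  have hdec : (fun x => decide (condA x = true)) = condA := by
    funext x; simp
  rw [hcongr, PySem.List.foldl_ite_eq_foldl_filter, hdec]
  rw [foldB _ _ ((PySem.List.pairwise_lt_pyRange_one 2 n).sublist List.filter_sublist)
      (fun x hx => (List.mem_filter.mp hx).2) (Or.inl rfl)]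
  rfl

theorem f_small (n : Int) (hn : n - 1 < 2) : f n = 0 := by
  rw [f_eq_pmax, PySem.List.pyRange_one_eq_nil (by omega)]
  rfl

-- ===== VERDICT (by name: the statement is the Claim_ definition above) =====
theorem f_spec : Claim_equal_f := by
  intro n _
  unfold Spec_f
  by_cases hn : n - 1 < 2
  · rw [f_small n hn]
    simp [f_alt, hn]
  · rw [f_eq_pmax, f_alt_eq_pmax n (by omega)]
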